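-- pv_equiv track=rewrite | github.com/MichaelJamesFinnerty/pymkdir | str_process.py | pop_kernel_from_string
-- ===== SOURCE A (Python) =====
-- def grouping_equilibrium(input_string, char):
--     closing_char = ")" if char == "(" else "}"
--     if input_string.count(char) == input_string.count(closing_char):
--         return True
--     else:
--         return False
--
-- def pop_kernel_from_string(input_string, grain=""):
--
--     #   if the input_string is null (meaning all characters
--     #   have been passed to the grain), the grain pops into
--     #   a kernel (see :else, below)
--     if input_string != "":
--         first_character = input_string[0]
--
--         #   the grain is fed the next character of the
--         #   input_string until it pops into a kernel
--         #
--         #   the pop occurs when: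
--         #       1) the end of input_string is reached, or
--         #       2) the next character is a space, and
--         #       3) all "()" and "{}" groupings are closed
--         #
--         if (
--             first_character == " " and
--             grouping_equilibrium(grain, "(") and
--             grouping_equilibrium(grain, "{")
--            ):
--
--             #   comma separation between elements is allowed,
--             #   but not required
--             #
--             #   if the user is using comma separation, the comma
--             #   is removed before further processing
--             kstring = grain[:-1] if grain[-1] == "," else grain
--
--         #   if the pop has not yet occurred, the first character
--         #   of the input string is added to the grain, and both
--         #   elements are recursed back in to the function
--         else:
--             kstring = pop_kernel_from_string(
--                         input_string[1:],
--                         grain + first_character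
--                         )
--     else:
--         kstring = grain
--     return kstring
-- ===== SOURCE B (Python) =====
-- def pop_kernel_from_string(input_string, grain=""):
--     # Single linear pass with running bracket/brace balance counters.
--     paren = grain.count("(") - grain.count(")")
--     brace = grain.count("{") - grain.count("}")
--     for i, c in enumerate(input_string):
--         if c == " " and paren == 0 and brace == 0:
--             token = grain + input_string[:i]
--             return token[:-1] if token.endswith(",") else token
--         elif c == "(":
--             paren += 1
--         elif c == ")":
--             paren -= 1
--         elif c == "{":
--             brace += 1
--         elif c == "}":
--             brace -= 1
--     return grain + input_string
-- ===== Notes on version B (the rewrite author's own statement) =====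
-- stated objective: faster
-- what changed: Replaced A's character-by-character recursion that re-counts all brackets/braces of the accumulated grain at every space (via string .count) with a single linear scan maintaining running paren/brace balance counters, slicing the token out once.
import Mathlib
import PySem

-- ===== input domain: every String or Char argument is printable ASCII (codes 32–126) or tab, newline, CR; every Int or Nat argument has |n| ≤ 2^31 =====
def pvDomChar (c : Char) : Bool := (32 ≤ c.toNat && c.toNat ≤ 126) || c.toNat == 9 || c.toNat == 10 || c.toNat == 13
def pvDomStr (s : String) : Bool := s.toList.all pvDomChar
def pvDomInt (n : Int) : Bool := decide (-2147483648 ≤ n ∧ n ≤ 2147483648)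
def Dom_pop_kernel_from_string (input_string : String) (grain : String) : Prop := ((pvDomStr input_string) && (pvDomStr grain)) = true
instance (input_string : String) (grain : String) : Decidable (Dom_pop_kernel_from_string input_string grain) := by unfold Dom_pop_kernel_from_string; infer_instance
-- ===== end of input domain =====

-- B replaces A's quadratic recursion (re-counting the grain's brackets at every space)
-- by one linear pass with running bracket/brace balance counters (objective: faster).

-- ===== PORT A =====
def grouping_equilibrium (input_string : String) (char : String) : Bool :=
  let closing_char := if char == "(" then ")" else "}"
  PySem.Str.count input_string char == PySem.Str.count input_string closing_char

-- A's recursion 'pop_kernel_from_string(input_string[1:], grain + first_character)', on char lists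
def popKernelGo : List Char → List Char → List Char
  | [], grain => grain
  | first_character :: rest, grain =>
    if first_character == ' '
        && grouping_equilibrium (String.ofList grain) "("
        && grouping_equilibrium (String.ofList grain) "{" then
      -- grain[:-1] if grain[-1] == "," else grain  (grain[-1] raises on empty grain: outside Pre_)
      if PySem.List.pyGet? grain (-1) == some ',' then PySem.List.slice grain none (some (-1)) else grain
    else popKernelGo rest (grain ++ [first_character])

def pop_kernel_from_string (input_string : String) (grain : String) : String :=
  String.ofList (popKernelGo input_string.toList grain.toList)

-- ===== PORT B =====
-- Source B's for-loop: scan for the splitting space, returning the consumed prefix (none = loop ran out)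
def takeToken : List Char → Int → Int → Option (List Char)
  | [], _, _ => none
  | c :: rest, paren, brace =>
    if c == ' ' && paren == 0 && brace == 0 then some []
    else
      let paren' := if c == '(' then paren + 1 else if c == ')' then paren - 1 else paren
      let brace' := if c == '{' then brace + 1 else if c == '}' then brace - 1 else brace
      match takeToken rest paren' brace' with
      | some t => some (c :: t)
      | none => none

def pop_kernel_from_string_alt (input_string : String) (grain : String) : String :=
  let g := grain.toList
  let paren : Int := (g.count '(' : Int) - (g.count ')' : Int)
  let brace : Int := (g.count '{' : Int) - (g.count '}' : Int)
  match takeToken input_string.toList paren brace with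
  | some t =>
      let token := g ++ t
      if PySem.Chars.endswith token [','] then String.ofList token.dropLast else String.ofList token
  | none => String.ofList (g ++ input_string.toList)

-- ===== PRECONDITION & SPEC =====
-- Pre_ excludes exactly the inputs on which Python A raises IndexError (grain[-1] with empty
-- grain): empty grain with the input string starting with a space.
def Pre_pop_kernel_from_string (input_string : String) (grain : String) : Prop :=
  ¬ (grain = "" ∧ input_string.toList.head? = some ' ')
instance (input_string : String) (grain : String) : Decidable (Pre_pop_kernel_from_string input_string grain) := by unfold Pre_pop_kernel_from_string; infer_instance

def pvWitness_pop_kernel_from_string : String × String := ("foo(a, b) bar", "")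

def Spec_pop_kernel_from_string (input_string : String) (grain : String) (out : String) : Prop := out = pop_kernel_from_string_alt input_string grain
instance (input_string : String) (grain : String) (out : String) : Decidable (Spec_pop_kernel_from_string input_string grain out) := by unfold Spec_pop_kernel_from_string; infer_instance

-- ===== CLAIM (what is proved, stated in full; the proofs are below) =====
def Claim_equal_pop_kernel_from_string : Prop := ∀ (input_string : String) (grain : String), Dom_pop_kernel_from_string input_string grain → Pre_pop_kernel_from_string input_string grain → Spec_pop_kernel_from_string input_string grain (pop_kernel_from_string input_string grain)


-- ===== LEMMAS AND PROOFS =====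

theorem count_go_singleton (x : Char) (t : List Char) : ∀ (fuel acc : Nat), t.length ≤ fuel →
    PySem.Chars.count.go [x] fuel t acc = acc + t.count x := by
  induction t with
  | nil => intro fuel acc h; cases fuel <;> simp [PySem.Chars.count.go]
  | cons c t ih =>
    intro fuel acc h
    cases fuel with
    | zero => simp at h
    | succ n =>
      simp only [PySem.Chars.count.go]
      by_cases hc : c = x
      · subst hc
        simp [List.isPrefixOf, ih n (acc + 1) (by simpa using h)]
        omega
      · simp [List.isPrefixOf, hc, ih n acc (by simpa using h), Ne.symm hc]

theorem count_singleton (g : List Char) (x : Char) : PySem.Chars.count g [x] = g.count x := by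
  simp [PySem.Chars.count, count_go_singleton x g g.length 0 le_rfl]

-- A's equilibrium test is the running balance being zero
theorem equilibrium_paren (g : List Char) :
    grouping_equilibrium (String.ofList g) "(" = decide ((g.count '(' : Int) - (g.count ')' : Int) = 0) := by
  have hif : (if ("(" : String) == "(" then (")" : String) else "}") = ")" := by decide
  have h1 : ("(" : String).toList = ['('] := by decide
  have h2 : (")" : String).toList = [')'] := by decide
  have h3 : ((g.count '(' : Int) - (g.count ')' : Int) = 0) ↔ g.count '(' = g.count ')' := by omega
  simp only [grouping_equilibrium, hif, PySem.Str.count, String.toList_ofList, h1, h2,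
    count_singleton, h3]
  by_cases h : g.count '(' = g.count ')' <;> simp [h]

theorem equilibrium_brace (g : List Char) :
    grouping_equilibrium (String.ofList g) "{" = decide ((g.count '{' : Int) - (g.count '}' : Int) = 0) := by
  have hif : (if ("{" : String) == "(" then (")" : String) else "}") = "}" := by decide
  have h1 : ("{" : String).toList = ['{'] := by decide
  have h2 : ("}" : String).toList = ['}'] := by decide
  have h3 : ((g.count '{' : Int) - (g.count '}' : Int) = 0) ↔ g.count '{' = g.count '}' := by omega
  simp only [grouping_equilibrium, hif, PySem.Str.count, String.toList_ofList, h1, h2,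
    count_singleton, h3]
  by_cases h : g.count '{' = g.count '}' <;> simp [h]

-- A's comma strip on the finished token equals B's
theorem strip_eq (g : List Char) :
    (if PySem.List.pyGet? g (-1) == some ',' then PySem.List.slice g none (some (-1)) else g)
      = (if PySem.Chars.endswith g [','] then g.dropLast else g) := by
  rw [PySem.List.pyGet?_neg_one, PySem.List.slice_to_neg_one]
  rcases g.eq_nil_or_concat with rfl | ⟨ys, c, rfl⟩
  · decide
  · simp only [List.concat_eq_append]
    have hl : (ys ++ [c]).getLast? = some c := by simp
    rw [hl]
    have he : PySem.Chars.endswith (ys ++ [c]) [','] = true ↔ c = ',' := by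
      rw [PySem.Chars.endswith_iff]
      constructor
      · rintro ⟨t, ht⟩
        have := congrArg List.getLast? ht
        simp at this
        exact this.symm
      · rintro rfl; exact ⟨ys, rfl⟩
    by_cases hc : c = ','
    · rw [if_pos (by simp [hc]), if_pos (he.mpr hc)]
    · rw [if_neg (by simp [hc]), if_neg (fun h => hc (he.mp h))]

theorem main_eq (cs : List Char) : ∀ (g : List Char),
    popKernelGo cs g =
      (match takeToken cs ((g.count '(' : Int) - (g.count ')' : Int)) ((g.count '{' : Int) - (g.count '}' : Int)) with
        | some t =>
            if PySem.Chars.endswith (g ++ t) [','] then (g ++ t).dropLast else (g ++ t)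
        | none => g ++ cs) := by
  induction cs with
  | nil => intro g; simp [popKernelGo, takeToken]
  | cons c rest ih =>
    intro g
    simp only [popKernelGo, takeToken, equilibrium_paren, equilibrium_brace]
    by_cases hcond : (c == ' ' && decide ((g.count '(' : Int) - (g.count ')' : Int) = 0)
        && decide ((g.count '{' : Int) - (g.count '}' : Int) = 0)) = true
    · rw [if_pos hcond]
      have : (c == ' ' && ((g.count '(' : Int) - (g.count ')' : Int)) == 0
          && ((g.count '{' : Int) - (g.count '}' : Int)) == 0) = true := by
        simpa [beq_iff_eq] using hcond
      rw [if_pos this]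
      simpa using strip_eq g
    · rw [if_neg hcond]
      have hneg : (c == ' ' && ((g.count '(' : Int) - (g.count ')' : Int)) == 0
          && ((g.count '{' : Int) - (g.count '}' : Int)) == 0) = false := by
        simpa [beq_iff_eq] using hcond
      rw [hneg]
      simp only [Bool.false_eq_true, if_false]
      have hp : (if c == '(' then (g.count '(' : Int) - (g.count ')' : Int) + 1
            else if c == ')' then (g.count '(' : Int) - (g.count ')' : Int) - 1
            else (g.count '(' : Int) - (g.count ')' : Int))
          = ((g ++ [c]).count '(' : Int) - ((g ++ [c]).count ')' : Int) := by
        by_cases h1 : c = '(' <;> by_cases h2 : c = ')' <;>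
          simp_all [List.count_append] <;> omega
      have hb : (if c == '{' then (g.count '{' : Int) - (g.count '}' : Int) + 1
            else if c == '}' then (g.count '{' : Int) - (g.count '}' : Int) - 1
            else (g.count '{' : Int) - (g.count '}' : Int))
          = ((g ++ [c]).count '{' : Int) - ((g ++ [c]).count '}' : Int) := by
        by_cases h1 : c = '{' <;> by_cases h2 : c = '}' <;>
          simp_all [List.count_append] <;> omega
      rw [hp, hb, ih (g ++ [c])]
      cases htk : takeToken rest (((g ++ [c]).count '(' : Int) - ((g ++ [c]).count ')' : Int))
          (((g ++ [c]).count '{' : Int) - ((g ++ [c]).count '}' : Int)) <;> simp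

-- ===== VERDICT (by name: the statement is the Claim_ definition above) =====
theorem pop_kernel_from_string_spec : Claim_equal_pop_kernel_from_string := by
  intro input_string grain _ _
  unfold Spec_pop_kernel_from_string pop_kernel_from_string pop_kernel_from_string_alt
  rw [main_eq]
  cases htk : takeToken input_string.toList ((grain.toList.count '(' : Int) - (grain.toList.count ')' : Int))
      ((grain.toList.count '{' : Int) - (grain.toList.count '}' : Int))
  · simp only [htk]
  · simp only [htk]
    split_ifs <;> rfl
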